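-- pv_equiv track=rewrite | github.com/chickenchickenlove/BOJ-Algorithm | BOJ_백준 알고리즘/2638_치즈.py | check_remove
-- ===== SOURCE A (Python) =====
-- def check_remove(n,m,check_map, my_map):
--
--     stack = []
--     for r in range(n):
--         for c in range(m):
--
--             #치즈면 확인
--             if my_map[r][c] == 1:
--                 # 초기값 셋팅
--                 cnt = 0
--                 # 4방향을 확인한다.
--                 for rr,cc in tra_list:
--                     next_r, next_c = r + rr, c + cc
--                     if -1 < next_r < n and -1 < next_c < m:
--                         # 공기 + 외부인지 확인한다 ( check_map == 1이면 내부공기다 )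
--                         if my_map[next_r][next_c] == 0 and check_map[next_r][next_c] == 2:
--                             # 공기 + 외부가 맞으면, 카운트 하나 늘려준다
--                             cnt +=1
--
--                 # 2변 이상 접촉 했으면, 제거될 치즈로 넣어준다.
--                 if cnt >= 2 :
--                     stack.append((r,c))
--
--     # 제거될 치즈가 없음
--     if len(stack) == 0 :
--         return True
--
--     # 제거될 치즈가 있음.
--     else :
--         while stack:
--             # 치즈를 모두 제거해준다.
--             r, c = stack.pop()
--             my_map[r][c] = 0
--         return False
--
-- tra_list = [[1,0],[0,1],[-1,0],[0,-1]]
-- ===== SOURCE B (Python) =====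
-- tra_list = [[1,0],[0,1],[-1,0],[0,-1]]
--
-- def check_remove(n, m, check_map, my_map):
--     # scatter pass: every external-air cell votes for each in-grid cheese neighbour
--     hits = []
--     for r in range(n):
--         for c in range(m):
--             if my_map[r][c] == 0 and check_map[r][c] == 2:
--                 for rr, cc in tra_list:
--                     nr, nc = r + rr, c + cc
--                     if 0 <= nr < n and 0 <= nc < m and my_map[nr][nc] == 1:
--                         hits.append((nr, nc))
--     removed = {p for p in hits if hits.count(p) >= 2}
--     for r, c in removed:
--         my_map[r][c] = 0
--     return not removed
-- ===== Notes on version B (the rewrite author's own statement) =====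
-- stated objective: alternative
-- what changed: Inverts the loop: instead of gathering, per cheese cell, a count over its 4 neighbours, B scatters one vote from every external-air cell to each in-grid cheese neighbour and then removes the cheese cells that collected >= 2 votes.
-- outside the precondition, e.g. on check_remove(1, 1, [], [[0]]): A returns True, B raises IndexError; on check_remove(1, 2, [[2]], [[0, 0]]): A returns True, B raises IndexError
import Mathlib
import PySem

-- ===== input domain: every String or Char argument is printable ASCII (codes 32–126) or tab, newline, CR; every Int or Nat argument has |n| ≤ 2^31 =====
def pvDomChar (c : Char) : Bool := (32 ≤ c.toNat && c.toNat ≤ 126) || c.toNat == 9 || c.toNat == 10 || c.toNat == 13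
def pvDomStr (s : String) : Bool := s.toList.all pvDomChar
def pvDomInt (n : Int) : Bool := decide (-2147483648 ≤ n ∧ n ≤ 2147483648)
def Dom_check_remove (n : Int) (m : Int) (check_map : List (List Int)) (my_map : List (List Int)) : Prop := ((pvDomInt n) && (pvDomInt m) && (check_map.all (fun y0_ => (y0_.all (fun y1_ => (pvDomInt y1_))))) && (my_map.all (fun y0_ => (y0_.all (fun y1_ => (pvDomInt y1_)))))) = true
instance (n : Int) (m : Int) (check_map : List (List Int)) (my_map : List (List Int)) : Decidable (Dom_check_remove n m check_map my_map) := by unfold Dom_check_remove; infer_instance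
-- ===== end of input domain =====

-- B replaces A's gather loop (per cheese cell, count its external-air neighbours) by a scatter pass
-- (every external-air cell votes for each in-grid cheese neighbour; cells with >= 2 votes are removed).
-- Python A and B both set the removed cells of my_map to 0 in place (the same set of cells); the
-- equivalence proved here is about the return value.

-- the module-level constant tra_list
def tra_list : List (Int × Int) := [(1, 0), (0, 1), (-1, 0), (0, -1)]

-- g[r][c] (both Pythons index with r, c that are provably in range under Pre_; total form of xs[i])
def pvGet (g : List (List Int)) (r c : Int) : Int :=
  PySem.List.pyGetD (PySem.List.pyGetD g r []) c 0

-- ===== PORT A =====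
def check_remove (n : Int) (m : Int) (check_map : List (List Int)) (my_map : List (List Int)) : Bool :=
  let stack : List (Int × Int) :=
    (PySem.List.pyRange 0 n 1).foldl (fun stack r =>
      (PySem.List.pyRange 0 m 1).foldl (fun stack c =>
        if pvGet my_map r c = 1 then
          let cnt : Int := tra_list.foldl (fun cnt d =>
            let next_r := r + d.1
            let next_c := c + d.2
            if -1 < next_r ∧ next_r < n ∧ -1 < next_c ∧ next_c < m then
              if pvGet my_map next_r next_c = 0 ∧ pvGet check_map next_r next_c = 2 then
                cnt + 1
              else cnt
            else cnt) 0
          if cnt ≥ 2 then stack ++ [(r, c)] else stack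
        else stack) stack) []
  if stack.length = 0 then true else false

-- ===== PORT B =====
def check_remove_alt (n : Int) (m : Int) (check_map : List (List Int)) (my_map : List (List Int)) : Bool :=
  let hits : List (Int × Int) :=
    (PySem.List.pyRange 0 n 1).foldl (fun hits r =>
      (PySem.List.pyRange 0 m 1).foldl (fun hits c =>
        if pvGet my_map r c = 0 ∧ pvGet check_map r c = 2 then
          tra_list.foldl (fun hits d =>
            let nr := r + d.1
            let nc := c + d.2
            if 0 ≤ nr ∧ nr < n ∧ 0 ≤ nc ∧ nc < m ∧ pvGet my_map nr nc = 1 then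
              hits ++ [(nr, nc)]
            else hits) hits
        else hits) hits) []
  let removed : List (Int × Int) := PySem.Set.ofList (hits.filter (fun p => 2 ≤ hits.count p))
  removed.isEmpty

-- ===== PRECONDITION & SPEC =====
-- Pre_ requires check_map (like my_map) to cover the full n×m region; A reads check_map only next to
-- cheese cells and can also return on smaller check_maps, while B reads check_map at every air cell
-- and raises IndexError there — those inputs are excluded.
def Pre_check_remove (n : Int) (m : Int) (check_map : List (List Int)) (my_map : List (List Int)) : Prop :=
  0 < n → 0 < m →
    (n ≤ (my_map.length : Int) ∧ n ≤ (check_map.length : Int) ∧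
     (∀ row ∈ my_map.take n.toNat, m ≤ (row.length : Int)) ∧
     (∀ row ∈ check_map.take n.toNat, m ≤ (row.length : Int)))
instance (n : Int) (m : Int) (check_map : List (List Int)) (my_map : List (List Int)) : Decidable (Pre_check_remove n m check_map my_map) := by unfold Pre_check_remove; infer_instance

def pvWitness_check_remove : Int × Int × List (List Int) × List (List Int) :=
  (2, 2, [[2, 2], [2, 2]], [[1, 0], [0, 0]])

def Spec_check_remove (n : Int) (m : Int) (check_map : List (List Int)) (my_map : List (List Int)) (out : Bool) : Prop := out = check_remove_alt n m check_map my_map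
instance (n : Int) (m : Int) (check_map : List (List Int)) (my_map : List (List Int)) (out : Bool) : Decidable (Spec_check_remove n m check_map my_map out) := by unfold Spec_check_remove; infer_instance

-- ===== CLAIM (what is proved, stated in full; the proofs are below) =====
def Claim_equal_check_remove : Prop := ∀ (n : Int) (m : Int) (check_map : List (List Int)) (my_map : List (List Int)), Dom_check_remove n m check_map my_map → Pre_check_remove n m check_map my_map → Spec_check_remove n m check_map my_map (check_remove n m check_map my_map)

-- ===== LEMMAS AND PROOFS =====


-- the count A gathers at a cheese cell (r, c)
def pvGcnt (n m : Int) (cm mm : List (List Int)) (r c : Int) : Nat :=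
  tra_list.countP (fun d => decide ((0 ≤ r + d.1 ∧ r + d.1 < n ∧ 0 ≤ c + d.2 ∧ c + d.2 < m) ∧ (pvGet mm (r + d.1) (c + d.2) = 0 ∧ pvGet cm (r + d.1) (c + d.2) = 2)))

-- the hit list B scatters, in flatMap form
def pvHits (n : Int) (m : Int) (cm mm : List (List Int)) : List (Int × Int) :=
  (PySem.List.pyRange 0 n 1).flatMap (fun r =>
    (PySem.List.pyRange 0 m 1).flatMap (fun c =>
      if (pvGet mm r c = 0 ∧ pvGet cm r c = 2) then
        (tra_list.filter (fun d => decide ((0 ≤ r + d.1 ∧ r + d.1 < n ∧ 0 ≤ c + d.2 ∧ c + d.2 < m) ∧ pvGet mm (r + d.1) (c + d.2) = 1))).map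
          (fun d => (r + d.1, c + d.2))
      else []))

theorem pv_sum_point (l : List Int) (hl : l.Nodup) (v : Int) (g : Int → Nat) :
    (l.map (fun x => if x = v then g x else 0)).sum = if v ∈ l then g v else 0 := by
  induction l with
  | nil => simp
  | cons x t ih =>
    rcases List.nodup_cons.mp hl with ⟨hx, ht⟩
    simp only [List.map_cons, List.sum_cons, ih ht, List.mem_cons]
    by_cases hxv : x = v
    · subst hxv; simp [hx]
    · rw [if_neg hxv]; simp [Ne.symm hxv]

theorem pv_point1 (k v : Int) (P : Int → Prop) [DecidablePred P] :
    ((PySem.List.pyRange 0 k 1).map (fun x => if x = v ∧ P x then 1 else 0)).sum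
      = if 0 ≤ v ∧ v < k ∧ P v then 1 else 0 := by
  rw [List.map_congr_left (g := fun x => if x = v then (if P x then 1 else 0) else 0)
    (fun x _ => by by_cases h1 : x = v <;> by_cases h2 : P x <;> simp [h1, h2])]
  rw [pv_sum_point _ (PySem.List.nodup_pyRange_one 0 k) v (fun x => if P x then 1 else 0)]
  simp only [PySem.List.mem_pyRange_one]
  split_ifs <;> first | rfl | tauto

theorem pv_point2 (n m a b : Int) (F : Int → Int → Prop) [∀ r c, Decidable (F r c)] :
    ((PySem.List.pyRange 0 n 1).map (fun r =>
       ((PySem.List.pyRange 0 m 1).map (fun c => if r = a ∧ c = b ∧ F r c then 1 else 0)).sum)).sum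
      = if 0 ≤ a ∧ a < n ∧ 0 ≤ b ∧ b < m ∧ F a b then 1 else 0 := by
  rw [List.map_congr_left (g := fun r => if r = a ∧ (0 ≤ b ∧ b < m ∧ F r b) then 1 else 0)
    (fun r _ => by
      rw [List.map_congr_left (g := fun c => if c = b ∧ (r = a ∧ F r c) then 1 else 0)
        (fun c _ => by
          by_cases h1 : r = a <;> by_cases h2 : c = b <;> by_cases h3 : F r c <;>
            simp [h1, h2, h3])]
      rw [pv_point1 m b (fun c => r = a ∧ F r c)]
      by_cases h1 : r = a <;> by_cases h2 : 0 ≤ b ∧ b < m <;> by_cases h3 : F r b <;>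
        simp [h1, h2, h3])]
  rw [pv_point1 n a (fun r => 0 ≤ b ∧ b < m ∧ F r b)]

theorem pv_point2g (n m a b : Int) (E1 E2 : Int → Prop) [DecidablePred E1] [DecidablePred E2]
    (hE1 : ∀ r, E1 r ↔ r = a) (hE2 : ∀ c, E2 c ↔ c = b)
    (P Q : Int → Int → Prop) [∀ r c, Decidable (P r c)] [∀ r c, Decidable (Q r c)] :
    ((PySem.List.pyRange 0 n 1).map (fun r =>
       ((PySem.List.pyRange 0 m 1).map (fun c =>
          if P r c ∧ (E1 r ∧ E2 c) ∧ Q r c then 1 else 0)).sum)).sum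
      = if 0 ≤ a ∧ a < n ∧ 0 ≤ b ∧ b < m ∧ (P a b ∧ Q a b) then 1 else 0 := by
  rw [List.map_congr_left
    (g := fun r => ((PySem.List.pyRange 0 m 1).map (fun c =>
        if r = a ∧ c = b ∧ (P r c ∧ Q r c) then 1 else 0)).sum)
    (fun r _ => by
      beta_reduce
      rw [List.map_congr_left
        (g := fun c => if r = a ∧ c = b ∧ (P r c ∧ Q r c) then 1 else 0)
        (fun c _ => by
          beta_reduce
          exact if_congr (by rw [hE1 r, hE2 c]; tauto) rfl rfl)])]
  exact pv_point2 n m a b (fun r c => P r c ∧ Q r c)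

set_option maxHeartbeats 2000000 in
theorem pvHits_count (n m : Int) (cm mm : List (List Int)) (p : Int × Int)
    (h1 : (0 ≤ p.1 ∧ p.1 < n ∧ 0 ≤ p.2 ∧ p.2 < m)) (h2 : pvGet mm p.1 p.2 = 1) :
    (pvHits n m cm mm).count p = pvGcnt n m cm mm p.1 p.2 := by
  obtain ⟨pr, pc⟩ := p
  simp only at h1 h2 ⊢
  have hcell : ∀ r c : Int,
      List.count (pr, pc) (if (pvGet mm r c = 0 ∧ pvGet cm r c = 2) then
        (tra_list.filter (fun d =>
          decide ((0 ≤ r + d.1 ∧ r + d.1 < n ∧ 0 ≤ c + d.2 ∧ c + d.2 < m) ∧ pvGet mm (r + d.1) (c + d.2) = 1))).map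
            (fun d => (r + d.1, c + d.2)) else [])
      = (if (pvGet mm r c = 0 ∧ pvGet cm r c = 2) ∧ (r + 1 = pr ∧ c = pc) ∧ (0 ≤ r + 1 ∧ r + 1 < n ∧ 0 ≤ c ∧ c < m) ∧ pvGet mm (r + 1) c = 1 then 1 else 0)
      + (if (pvGet mm r c = 0 ∧ pvGet cm r c = 2) ∧ (r = pr ∧ c + 1 = pc) ∧ (0 ≤ r ∧ r < n ∧ 0 ≤ c + 1 ∧ c + 1 < m) ∧ pvGet mm r (c + 1) = 1 then 1 else 0)
      + (if (pvGet mm r c = 0 ∧ pvGet cm r c = 2) ∧ (r - 1 = pr ∧ c = pc) ∧ (0 ≤ r - 1 ∧ r - 1 < n ∧ 0 ≤ c ∧ c < m) ∧ pvGet mm (r - 1) c = 1 then 1 else 0)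
      + (if (pvGet mm r c = 0 ∧ pvGet cm r c = 2) ∧ (r = pr ∧ c - 1 = pc) ∧ (0 ≤ r ∧ r < n ∧ 0 ≤ c - 1 ∧ c - 1 < m) ∧ pvGet mm r (c - 1) = 1 then 1 else 0) := by
    intro r c
    by_cases ha : (pvGet mm r c = 0 ∧ pvGet cm r c = 2)
    · rw [if_pos ha, List.count_eq_countP, List.countP_map, List.countP_filter]
      simp only [tra_list, List.countP_cons, List.countP_nil, Function.comp,
        Bool.and_eq_true, beq_iff_eq, Prod.mk.injEq, decide_eq_true_eq,
        add_zero, ← sub_eq_add_neg]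
      have ht : (pvGet mm r c = 0 ∧ pvGet cm r c = 2) = True := eq_true ha
      simp only [ht, true_and]
      ring
    · rw [if_neg ha]
      simp [ha]
  unfold pvHits
  rw [List.count_flatMap]
  rw [List.map_congr_left
    (g := fun r => ((PySem.List.pyRange 0 m 1).map (fun c =>
        (if (pvGet mm r c = 0 ∧ pvGet cm r c = 2) ∧ (r + 1 = pr ∧ c = pc) ∧ (0 ≤ r + 1 ∧ r + 1 < n ∧ 0 ≤ c ∧ c < m) ∧ pvGet mm (r + 1) c = 1 then 1 else 0)
      + (if (pvGet mm r c = 0 ∧ pvGet cm r c = 2) ∧ (r = pr ∧ c + 1 = pc) ∧ (0 ≤ r ∧ r < n ∧ 0 ≤ c + 1 ∧ c + 1 < m) ∧ pvGet mm r (c + 1) = 1 then 1 else 0)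
      + (if (pvGet mm r c = 0 ∧ pvGet cm r c = 2) ∧ (r - 1 = pr ∧ c = pc) ∧ (0 ≤ r - 1 ∧ r - 1 < n ∧ 0 ≤ c ∧ c < m) ∧ pvGet mm (r - 1) c = 1 then 1 else 0)
      + (if (pvGet mm r c = 0 ∧ pvGet cm r c = 2) ∧ (r = pr ∧ c - 1 = pc) ∧ (0 ≤ r ∧ r < n ∧ 0 ≤ c - 1 ∧ c - 1 < m) ∧ pvGet mm r (c - 1) = 1 then 1 else 0))).sum)
    (fun r _ => by
      simp only [Function.comp_apply]
      rw [List.count_flatMap]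
      exact congrArg List.sum
        (List.map_congr_left (fun c _ => by
          simp only [Function.comp_apply]
          exact hcell r c)))]
  simp only [List.sum_map_add]
  rw [pv_point2g n m (pr - 1) pc (fun r => r + 1 = pr) (fun c => c = pc)
    (fun r => by omega) (fun c => Iff.rfl)
    (fun r c => (pvGet mm r c = 0 ∧ pvGet cm r c = 2)) (fun r c => (0 ≤ r + 1 ∧ r + 1 < n ∧ 0 ≤ c ∧ c < m) ∧ pvGet mm (r + 1) c = 1)]
  rw [pv_point2g n m pr (pc - 1) (fun r => r = pr) (fun c => c + 1 = pc)
    (fun r => Iff.rfl) (fun c => by omega)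
    (fun r c => (pvGet mm r c = 0 ∧ pvGet cm r c = 2)) (fun r c => (0 ≤ r ∧ r < n ∧ 0 ≤ c + 1 ∧ c + 1 < m) ∧ pvGet mm r (c + 1) = 1)]
  rw [pv_point2g n m (pr + 1) pc (fun r => r - 1 = pr) (fun c => c = pc)
    (fun r => by omega) (fun c => Iff.rfl)
    (fun r c => (pvGet mm r c = 0 ∧ pvGet cm r c = 2)) (fun r c => (0 ≤ r - 1 ∧ r - 1 < n ∧ 0 ≤ c ∧ c < m) ∧ pvGet mm (r - 1) c = 1)]
  rw [pv_point2g n m pr (pc + 1) (fun r => r = pr) (fun c => c - 1 = pc)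
    (fun r => Iff.rfl) (fun c => by omega)
    (fun r c => (pvGet mm r c = 0 ∧ pvGet cm r c = 2)) (fun r c => (0 ≤ r ∧ r < n ∧ 0 ≤ c - 1 ∧ c - 1 < m) ∧ pvGet mm r (c - 1) = 1)]
  have e1 : pr - 1 + 1 = pr := by ring
  have e2 : pc - 1 + 1 = pc := by ring
  have e3 : pr + 1 - 1 = pr := by ring
  have e4 : pc + 1 - 1 = pc := by ring
  simp only [e1, e2, e3, e4]
  simp only [pvGcnt, tra_list, List.countP_cons, List.countP_nil, decide_eq_true_eq,
    add_zero, ← sub_eq_add_neg]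
  have htrue : ((0 ≤ pr ∧ pr < n ∧ 0 ≤ pc ∧ pc < m) ∧ pvGet mm pr pc = 1) = True :=
    eq_true ⟨h1, h2⟩
  simp only [htrue, and_true, and_assoc]
  ring

theorem pvA_char (n m : Int) (cm mm : List (List Int)) :
    check_remove n m cm mm = true ↔
      ∀ r c, (0 ≤ r ∧ r < n ∧ 0 ≤ c ∧ c < m) → pvGet mm r c = 1 → pvGcnt n m cm mm r c < 2 := by
  have hcnt : ∀ r c : Int, tra_list.foldl (fun cnt d =>
      if -1 < r + d.1 ∧ r + d.1 < n ∧ -1 < c + d.2 ∧ c + d.2 < m then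
        if pvGet mm (r + d.1) (c + d.2) = 0 ∧ pvGet cm (r + d.1) (c + d.2) = 2 then cnt + 1 else cnt
      else cnt) (0:Int) = (pvGcnt n m cm mm r c : Int) := by
    intro r c
    rw [PySem.List.foldl_congr_mem' tra_list _
      (fun cnt d => if (0 ≤ r + d.1 ∧ r + d.1 < n ∧ 0 ≤ c + d.2 ∧ c + d.2 < m) ∧ (pvGet mm (r + d.1) (c + d.2) = 0 ∧ pvGet cm (r + d.1) (c + d.2) = 2) then cnt + 1 else cnt) 0
      (fun d _ cnt => by beta_reduce; split_ifs <;> omega)]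
    rw [PySem.List.foldl_ite_add_one
      (fun (d : Int × Int) => (0 ≤ r + d.1 ∧ r + d.1 < n ∧ 0 ≤ c + d.2 ∧ c + d.2 < m) ∧ (pvGet mm (r + d.1) (c + d.2) = 0 ∧ pvGet cm (r + d.1) (c + d.2) = 2))]
    simp [pvGcnt]
  simp only [check_remove, hcnt]
  have hinner : ∀ (r : Int) (st : List (Int × Int)),
      (PySem.List.pyRange 0 m 1).foldl (fun stack c =>
        if pvGet mm r c = 1 then
          if (pvGcnt n m cm mm r c : Int) ≥ 2 then stack ++ [(r, c)] else stack
        else stack) st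
      = st ++ ((PySem.List.pyRange 0 m 1).filter
          (fun c => decide (pvGet mm r c = 1 ∧ 2 ≤ pvGcnt n m cm mm r c))).map (fun c => (r, c)) := by
    intro r st
    rw [PySem.List.foldl_congr_mem' _ _
      (fun stack c => if pvGet mm r c = 1 ∧ 2 ≤ pvGcnt n m cm mm r c then stack ++ [(r, c)] else stack) st
      (fun c _ stack => by beta_reduce; split_ifs <;> first | rfl | omega)]
    rw [PySem.List.foldl_append_ite
      (fun (c : Int) => pvGet mm r c = 1 ∧ 2 ≤ pvGcnt n m cm mm r c) (fun c => (r, c))]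
  simp only [hinner, PySem.List.foldl_append_eq_flatMap, List.nil_append]
  have h1 : ∀ (l : List (Int × Int)), ((if l.length = 0 then true else false) = true ↔ l = []) := by
    intro l; split_ifs with h <;> simp_all [List.length_eq_zero_iff]
  rw [h1]
  simp only [List.flatMap_eq_nil_iff, List.map_eq_nil_iff, List.filter_eq_nil_iff,
    PySem.List.mem_pyRange_one, decide_eq_true_eq]
  constructor
  · intro h r c hin hch
    have := h r ⟨hin.1, hin.2.1⟩ c ⟨hin.2.2.1, hin.2.2.2⟩
    omega
  · intro h r hr c hc hcon
    have hin : (0 ≤ r ∧ r < n ∧ 0 ≤ c ∧ c < m) := by omega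
    have := h r c hin hcon.1
    omega

theorem pvB_hits (n m : Int) (cm mm : List (List Int)) :
    check_remove_alt n m cm mm = true ↔
      ∀ p ∈ pvHits n m cm mm, (pvHits n m cm mm).count p < 2 := by
  simp only [check_remove_alt]
  have hdir : ∀ (r c : Int) (h : List (Int × Int)),
      tra_list.foldl (fun hits d =>
        if 0 ≤ r + d.1 ∧ r + d.1 < n ∧ 0 ≤ c + d.2 ∧ c + d.2 < m ∧ pvGet mm (r + d.1) (c + d.2) = 1 then
          hits ++ [(r + d.1, c + d.2)]
        else hits) h
      = h ++ (tra_list.filter (fun d =>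
          decide ((0 ≤ r + d.1 ∧ r + d.1 < n ∧ 0 ≤ c + d.2 ∧ c + d.2 < m) ∧ pvGet mm (r + d.1) (c + d.2) = 1))).map
            (fun d => (r + d.1, c + d.2)) := by
    intro r c h
    rw [PySem.List.foldl_append_ite
      (fun (d : Int × Int) => 0 ≤ r + d.1 ∧ r + d.1 < n ∧ 0 ≤ c + d.2 ∧ c + d.2 < m ∧ pvGet mm (r + d.1) (c + d.2) = 1)
      (fun d => (r + d.1, c + d.2))]
    rw [List.filter_congr (q := fun d => decide ((0 ≤ r + d.1 ∧ r + d.1 < n ∧ 0 ≤ c + d.2 ∧ c + d.2 < m) ∧ pvGet mm (r + d.1) (c + d.2) = 1))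
      (fun d _ => decide_eq_decide.mpr (by tauto))]
  simp only [hdir]
  have hcell : ∀ (r : Int) (h : List (Int × Int)),
      (PySem.List.pyRange 0 m 1).foldl (fun hits c =>
        if pvGet mm r c = 0 ∧ pvGet cm r c = 2 then
          hits ++ (tra_list.filter (fun d =>
            decide ((0 ≤ r + d.1 ∧ r + d.1 < n ∧ 0 ≤ c + d.2 ∧ c + d.2 < m) ∧ pvGet mm (r + d.1) (c + d.2) = 1))).map
              (fun d => (r + d.1, c + d.2))
        else hits) h
      = h ++ (PySem.List.pyRange 0 m 1).flatMap (fun c =>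
          if (pvGet mm r c = 0 ∧ pvGet cm r c = 2) then
            (tra_list.filter (fun d =>
              decide ((0 ≤ r + d.1 ∧ r + d.1 < n ∧ 0 ≤ c + d.2 ∧ c + d.2 < m) ∧ pvGet mm (r + d.1) (c + d.2) = 1))).map
                (fun d => (r + d.1, c + d.2))
          else []) := by
    intro r h
    rw [PySem.List.foldl_congr_mem' _ _
      (fun hits c => hits ++ if (pvGet mm r c = 0 ∧ pvGet cm r c = 2) then
          (tra_list.filter (fun d =>
            decide ((0 ≤ r + d.1 ∧ r + d.1 < n ∧ 0 ≤ c + d.2 ∧ c + d.2 < m) ∧ pvGet mm (r + d.1) (c + d.2) = 1))).map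
              (fun d => (r + d.1, c + d.2))
        else []) h
      (fun c _ hits => by beta_reduce; split_ifs <;> simp_all)]
    rw [PySem.List.foldl_append_eq_flatMap]
  simp only [hcell, PySem.List.foldl_append_eq_flatMap, List.nil_append]
  have hof : ∀ (l : List (Int × Int)), (PySem.Set.ofList l = [] ↔ l = []) := by
    intro l
    simp [List.eq_nil_iff_forall_not_mem, PySem.Set.mem_ofList]
  rw [List.isEmpty_iff, hof, List.filter_eq_nil_iff]
  show (∀ p ∈ pvHits n m cm mm, ¬(decide (2 ≤ (pvHits n m cm mm).count p)) = true) ↔ _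
  simp only [decide_eq_true_eq]
  constructor
  · intro h p hp; have := h p hp; omega
  · intro h p hp; have := h p hp; omega

theorem pvHits_mem (n m : Int) (cm mm : List (List Int)) (p : Int × Int) (hp : p ∈ pvHits n m cm mm) :
    (0 ≤ p.1 ∧ p.1 < n ∧ 0 ≤ p.2 ∧ p.2 < m) ∧ pvGet mm p.1 p.2 = 1 := by
  unfold pvHits at hp
  rw [List.mem_flatMap] at hp
  obtain ⟨r, _, hp⟩ := hp
  rw [List.mem_flatMap] at hp
  obtain ⟨c, _, hp⟩ := hp
  split at hp
  · rw [List.mem_map] at hp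
    obtain ⟨d, hd, rfl⟩ := hp
    rw [List.mem_filter] at hd
    simpa using hd.2
  · simp at hp

-- ===== VERDICT (by name: the statement is the Claim_ definition above) =====
theorem check_remove_spec : Claim_equal_check_remove := by
  intro n m cm mm _ _
  unfold Spec_check_remove
  rw [Bool.eq_iff_iff, pvA_char, pvB_hits]
  constructor
  · intro hA p hp
    obtain ⟨hin, hch⟩ := pvHits_mem n m cm mm p hp
    rw [pvHits_count n m cm mm p hin hch]
    exact hA p.1 p.2 hin hch
  · intro hB r c hin hch
    by_contra hge
    push Not at hge
    have hcnt : (pvHits n m cm mm).count (r, c) = pvGcnt n m cm mm r c :=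
      pvHits_count n m cm mm (r, c) hin hch
    have hmem : (r, c) ∈ pvHits n m cm mm := by
      rw [← List.count_pos_iff]
      omega
    have := hB (r, c) hmem
    omega
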